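-- pv_equiv track=rewrite | github.com/TensorGymnastic/CodeWiki | codewiki/src/enduser/docs.py | _extract_markdown_section_bodies
-- ===== SOURCE A (Python) =====
-- def _extract_markdown_section_bodies(markdown: str) -> dict[str, str]:
--     sections: dict[str, list[str]] = {}
--     current_section: str | None = None
--     for line in markdown.splitlines():
--         if line.startswith("## "):
--             current_section = line[3:].strip()
--             sections[current_section] = []
--             continue
--         if current_section is not None:
--             sections[current_section].append(line)
--     return {name: "\n".join(lines).strip() for name, lines in sections.items()}
-- ===== SOURCE B (Python) =====
-- def _span_at_header(lines):
--     """Split lines into (prefix before the first '## ' header, rest from that header)."""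
--     for i, l in enumerate(lines):
--         if l.startswith("## "):
--             return lines[:i], lines[i:]
--     return lines, []
--
--
-- def _group(lines):
--     """Recursively turn lines into (section name, body) pairs, in order."""
--     if not lines:
--         return []
--     first, tail = lines[0], lines[1:]
--     if not first.startswith("## "):
--         return _group(tail)
--     body, rest = _span_at_header(tail)
--     return [(first[3:].strip(), "\n".join(body).strip())] + _group(rest)
--
--
-- def _extract_markdown_section_bodies(markdown: str) -> dict[str, str]:
--     result: dict[str, str] = {}
--     for name, body in _group(markdown.splitlines()):
--         result[name] = body
--     return result
-- ===== Notes on version B (the rewrite author's own statement) =====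
-- stated objective: alternative
-- what changed: A threads a mutable current-section state through one loop that appends lines into the dict as it goes; B first recursively splits the line list at level-2 header lines into ordered (name, body) pairs via a span helper, then performs a single pass of dict assignments (last assignment wins, first position kept).
import Mathlib
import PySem

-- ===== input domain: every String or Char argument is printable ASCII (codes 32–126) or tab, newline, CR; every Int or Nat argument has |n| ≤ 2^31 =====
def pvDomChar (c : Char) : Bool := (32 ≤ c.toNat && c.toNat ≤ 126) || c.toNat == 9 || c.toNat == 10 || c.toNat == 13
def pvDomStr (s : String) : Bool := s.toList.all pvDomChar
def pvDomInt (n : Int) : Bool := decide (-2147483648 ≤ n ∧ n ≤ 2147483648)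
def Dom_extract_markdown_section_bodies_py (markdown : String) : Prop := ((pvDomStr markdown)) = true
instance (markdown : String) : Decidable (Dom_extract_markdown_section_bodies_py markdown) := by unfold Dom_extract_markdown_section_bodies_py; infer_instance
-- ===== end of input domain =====

-- B replaces A's stateful current-section loop by a recursive span-based grouping into
-- (name, body) pairs at level-2 header lines, followed by a single pass of dict
-- assignments (objective: alternative).

-- ===== PORT A =====
-- one iteration of A's for-loop: state = (sections dict, current_section)
def pvStepA (st : PySem.Dict String (List String) × Option String) (line : String) :
    PySem.Dict String (List String) × Option String :=
  if PySem.Str.startswith line "## " then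
    let cur := PySem.Str.strip (PySem.Str.slice line (some 3) none)
    (st.1.insert cur [], some cur)
  else
    match st.2 with
    | some c => (st.1.modify c [] (fun v => v ++ [line]), some c)
    | none => st

def extract_markdown_section_bodies_py (markdown : String) : List (String × String) :=
  let sections := (PySem.Str.splitlines markdown).foldl pvStepA (PySem.Dict.empty, none)
  -- the final dict comprehension over sections.items()
  ((sections.1.items).foldl
      (fun d p => d.insert p.1 (PySem.Str.strip (PySem.Str.join "\n" p.2)))
      PySem.Dict.empty).items

-- ===== PORT B =====
def pvIsHeader (l : String) : Bool := PySem.Str.startswith l "## "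

-- _span_at_header: split at the first '## ' header (the span idiom)
def pvSpanAtHeader (lines : List String) : List String × List String :=
  (lines.takeWhile (fun l => !pvIsHeader l), lines.dropWhile (fun l => !pvIsHeader l))

-- _group: recursively produce the (name, body) pairs in order
def pvGroup : List String → List (String × String)
  | [] => []
  | first :: tail =>
    if pvIsHeader first then
      [(PySem.Str.strip (PySem.Str.slice first (some 3) none),
        PySem.Str.strip (PySem.Str.join "\n" (pvSpanAtHeader tail).1))] ++
        pvGroup (pvSpanAtHeader tail).2
    else pvGroup tail
termination_by l => l.length
decreasing_by
  · simp only [pvSpanAtHeader, List.length_cons]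
    exact Nat.lt_succ_of_le (List.length_dropWhile_le _ _)
  · simp

def extract_markdown_section_bodies_py_alt (markdown : String) : List (String × String) :=
  ((pvGroup (PySem.Str.splitlines markdown)).foldl
      (fun d p => d.insert p.1 p.2) PySem.Dict.empty).items

-- ===== PRECONDITION & SPEC =====
def Spec_extract_markdown_section_bodies_py (markdown : String) (out : List (String × String)) : Prop := out = extract_markdown_section_bodies_py_alt markdown
instance (markdown : String) (out : List (String × String)) : Decidable (Spec_extract_markdown_section_bodies_py markdown out) := by unfold Spec_extract_markdown_section_bodies_py; infer_instance

-- ===== CLAIM (what is proved, stated in full; the proofs are below) =====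
def Claim_equal_extract_markdown_section_bodies_py : Prop := ∀ (markdown : String), Dom_extract_markdown_section_bodies_py markdown → Spec_extract_markdown_section_bodies_py markdown (extract_markdown_section_bodies_py markdown)

-- ===== LEMMAS AND PROOFS =====

-- abstraction: apply A's final strip-join comprehension to a dict of line lists
def pvFin (d : PySem.Dict String (List String)) : PySem.Dict String String :=
  PySem.Dict.mk (d.items.map (fun p => (p.1, PySem.Str.strip (PySem.Str.join "\n" p.2))))

theorem pvFin_contains (d : PySem.Dict String (List String)) (k : String) :
    (pvFin d).contains k = d.contains k := by
  simp [pvFin, PySem.Dict.contains, List.any_map, Function.comp_def]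

theorem pvFin_insert (d : PySem.Dict String (List String)) (k : String) (v : List String) :
    pvFin (d.insert k v) = (pvFin d).insert k (PySem.Str.strip (PySem.Str.join "\n" v)) := by
  apply PySem.Dict.ext
  rw [PySem.Dict.items_insert, pvFin_contains]
  show (List.map (fun p => (p.1, PySem.Str.strip (PySem.Str.join "\n" p.2)))
      (d.insert k v).items) = _
  rw [PySem.Dict.items_insert]
  by_cases h : d.contains k = true
  · simp only [pvFin, h, if_true, List.map_map]
    apply List.map_congr_left
    intro p _
    by_cases hk : p.1 = k
    · simp [hk]
    · simp [hk]
  · simp [pvFin, h]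

theorem pvModify_insert_self (d : PySem.Dict String (List String)) (k : String)
    (bs : List String) (f : List String → List String) :
    ((d.insert k bs).modify k [] f) = d.insert k (f bs) := by
  simp [PySem.Dict.modify, PySem.Dict.getD_insert_self, PySem.Dict.insert_insert_self]

theorem pvStepA_keys_nodup (ls : List String) :
    ∀ st : PySem.Dict String (List String) × Option String, st.1.keys.Nodup →
      (ls.foldl pvStepA st).1.keys.Nodup := by
  induction ls with
  | nil => intro st h; simpa using h
  | cons l ls ih =>
    intro st h
    simp only [List.foldl_cons]
    apply ih
    simp only [pvStepA]
    by_cases hh : PySem.Str.startswith l "## "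
    · simp only [hh, if_true]
      exact PySem.Dict.nodup_keys_insert _ _ _ h
    · simp only [hh]
      match hst : st.2 with
      | some c =>
        have : ((st.1.modify c [] (fun v => v ++ [l])).keys).Nodup := by
          rw [PySem.Dict.keys_modify]
          have := PySem.Dict.nodup_keys_insert st.1 c (st.1.getD c [] ++ [l]) h
          simpa using this
        simpa using this
      | none => simpa using h

theorem pvLoop_some (ls : List String) :
    ∀ (d : PySem.Dict String (List String)) (n : String) (bs : List String),
      pvFin ((ls.foldl pvStepA (d.insert n bs, some n)).1)
        = ((n, PySem.Str.strip (PySem.Str.join "\n"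
              (bs ++ ls.takeWhile (fun l => !pvIsHeader l))))
            :: pvGroup (ls.dropWhile (fun l => !pvIsHeader l))).foldl
            (fun d p => d.insert p.1 p.2) (pvFin d) := by
  induction ls with
  | nil =>
    intro d n bs
    simp [pvFin_insert, pvGroup]
  | cons l ls ih =>
    intro d n bs
    by_cases h : pvIsHeader l
    · have hsw : PySem.Str.startswith l "## " = true := h
      simp only [List.foldl_cons, pvStepA, hsw, if_true]
      rw [ih (d.insert n bs) _ []]
      simp only [List.takeWhile_cons, List.dropWhile_cons, h, Bool.not_true,
        Bool.false_eq_true, if_false, pvFin_insert]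
      conv_rhs => rw [pvGroup]
      simp [h, pvSpanAtHeader, List.foldl_cons]
    · have hsw : PySem.Str.startswith l "## " = false := by
        simpa [pvIsHeader] using h
      simp only [List.foldl_cons, pvStepA, hsw, Bool.false_eq_true, if_false]
      rw [pvModify_insert_self]
      rw [ih d n (bs ++ [l])]
      simp only [List.takeWhile_cons, List.dropWhile_cons, h, Bool.not_false, if_true]
      simp [List.append_assoc]

theorem pvLoop_none (ls : List String) :
    ∀ d : PySem.Dict String (List String),
      pvFin ((ls.foldl pvStepA (d, none)).1)
        = (pvGroup ls).foldl (fun d p => d.insert p.1 p.2) (pvFin d) := by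
  induction ls with
  | nil => intro d; simp [pvGroup]
  | cons l ls ih =>
    intro d
    by_cases h : pvIsHeader l
    · have hsw : PySem.Str.startswith l "## " = true := h
      simp only [List.foldl_cons, pvStepA, hsw, if_true]
      rw [pvLoop_some ls d _ []]
      conv_rhs => rw [pvGroup]
      simp [h, pvSpanAtHeader, List.foldl_cons]
    · have hsw : PySem.Str.startswith l "## " = false := by
        simpa [pvIsHeader] using h
      simp only [List.foldl_cons, pvStepA, hsw, Bool.false_eq_true, if_false]
      rw [ih d]
      conv_rhs => rw [pvGroup]
      simp [h]

-- the final comprehension over a nodup-keyed dict is pvFin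
theorem pvComprehension_eq (d : PySem.Dict String (List String)) (h : d.keys.Nodup) :
    ((d.items).foldl
        (fun d p => d.insert p.1 (PySem.Str.strip (PySem.Str.join "\n" p.2)))
        PySem.Dict.empty).items = (pvFin d).items := by
  rw [PySem.Dict.items_foldl_insert_fresh d.items (fun p => p.1)
      (fun p => PySem.Str.strip (PySem.Str.join "\n" p.2)) PySem.Dict.empty
      (fun a _ => PySem.Dict.contains_empty _) (by simpa [PySem.Dict.keys] using h)]
  simp [pvFin, PySem.Dict.empty]

-- ===== VERDICT (by name: the statement is the Claim_ definition above) =====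
theorem extract_markdown_section_bodies_py_spec : Claim_equal_extract_markdown_section_bodies_py := by
  intro markdown _
  unfold Spec_extract_markdown_section_bodies_py extract_markdown_section_bodies_py
    extract_markdown_section_bodies_py_alt
  have hnd : ((PySem.Str.splitlines markdown).foldl pvStepA
      (PySem.Dict.empty, none)).1.keys.Nodup := by
    apply pvStepA_keys_nodup
    simp [PySem.Dict.empty, PySem.Dict.keys]
  rw [pvComprehension_eq _ hnd]
  rw [pvLoop_none]
  have : pvFin PySem.Dict.empty = PySem.Dict.empty := by
    apply PySem.Dict.ext; simp [pvFin, PySem.Dict.empty]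
  rw [this]
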